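-- pv_equiv track=rewrite | github.com/srcoulombe/etf_comparer | utils.py | annotate_holdings
-- ===== SOURCE A (Python) =====
-- from typing import Mapping, List, Tuple, Callable, Union, Iterable
--
-- def annotate_holdings(query_output: Mapping[str, Mapping[str, Mapping]]) -> Mapping[str, str]:
--     all_holdings_with_annotations: Mapping[str, tuple] = dict()
--     for i, (etf, etf_holdings_dict) in enumerate(query_output.items()):
--         for holding in etf_holdings_dict.keys():
--             current_annotation = all_holdings_with_annotations.get(
--                 holding,
--                 [0]*len(query_output)
--             )
--             current_annotation[i] = 1
--             all_holdings_with_annotations[holding] = current_annotation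
--     return {
--         key: ''.join(map(str, annotation))
--         for key, annotation in
--         all_holdings_with_annotations.items()
--     }
-- ===== SOURCE B (Python) =====
-- def annotate_holdings(query_output):
--     etf_holdings_dicts = list(query_output.values())
--     holdings = dict.fromkeys(h for d in etf_holdings_dicts for h in d)
--     return {
--         h: ''.join('1' if h in d else '0' for d in etf_holdings_dicts)
--         for h in holdings
--     }
-- ===== Notes on version B (the rewrite author's own statement) =====
-- stated objective: simpler
-- what changed: A builds per-holding position-indexed annotation lists it mutates while looping ETF-major over a dict; B first dedups the holdings in first-appearance order and then builds each bitstring directly by a holding-major membership scan over the ETFs, with no mutable vectors or index bookkeeping.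
import Mathlib
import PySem

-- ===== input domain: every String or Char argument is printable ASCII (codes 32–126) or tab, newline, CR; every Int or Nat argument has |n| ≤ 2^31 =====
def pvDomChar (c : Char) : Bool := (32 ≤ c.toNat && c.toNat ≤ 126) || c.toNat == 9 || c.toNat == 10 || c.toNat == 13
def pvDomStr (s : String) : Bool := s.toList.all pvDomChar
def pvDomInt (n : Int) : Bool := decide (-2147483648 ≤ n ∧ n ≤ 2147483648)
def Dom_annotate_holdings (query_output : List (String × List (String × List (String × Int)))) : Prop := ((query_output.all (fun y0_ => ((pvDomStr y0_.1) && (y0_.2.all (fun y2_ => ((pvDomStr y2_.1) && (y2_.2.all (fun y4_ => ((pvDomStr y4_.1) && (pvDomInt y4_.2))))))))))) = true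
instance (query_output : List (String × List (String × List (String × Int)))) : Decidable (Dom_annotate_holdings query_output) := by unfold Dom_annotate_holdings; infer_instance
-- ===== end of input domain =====

-- B replaces A's ETF-major loop that mutates position-indexed annotation lists in a dict by a
-- holding-major dict comprehension: ordered dedup of the holdings, then a membership scan over the
-- ETFs builds each bitstring directly (simpler decomposition, same O(n·m) cost).

-- ===== PORT A =====
-- 'i' from enumerate satisfies 0 ≤ i < len(query_output), so '.toNat' and 'List.set' are exact here.
def annotate_holdings (query_output : List (String × List (String × List (String × Int)))) : List (String × String) :=
  let all :=
    (PySem.List.enumerate query_output 0).foldl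
      (fun d p =>
        p.2.2.foldl
          (fun d hp =>
            let cur := d.getD hp.1 (PySem.List.pyRepeat [(0 : Int)] (query_output.length : Int))
            d.insert hp.1 (cur.set p.1.toNat 1))
          d)
      (PySem.Dict.empty : PySem.Dict String (List Int))
  all.items.map (fun kv => (kv.1, PySem.Str.join "" (kv.2.map PySem.Int.toStr)))

-- ===== PORT B =====
def annotate_holdings_alt (query_output : List (String × List (String × List (String × Int)))) : List (String × String) :=
  let ds := query_output.map (fun e => e.2)
  let holdings := PySem.List.dedup (ds.flatMap (fun d => d.map (fun p => p.1)))
  holdings.map (fun h =>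
    (h, PySem.Str.join "" (ds.map (fun d => if (PySem.Dict.mk d).contains h then "1" else "0"))))

-- ===== PRECONDITION & SPEC =====
def Spec_annotate_holdings (query_output : List (String × List (String × List (String × Int)))) (out : List (String × String)) : Prop := out = annotate_holdings_alt query_output
instance (query_output : List (String × List (String × List (String × Int)))) (out : List (String × String)) : Decidable (Spec_annotate_holdings query_output out) := by unfold Spec_annotate_holdings; infer_instance

-- ===== CLAIM (what is proved, stated in full; the proofs are below) =====
def Claim_equal_annotate_holdings : Prop := ∀ (query_output : List (String × List (String × List (String × Int)))), Dom_annotate_holdings query_output → Spec_annotate_holdings query_output (annotate_holdings query_output)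

-- ===== LEMMAS AND PROOFS =====

def pvVec (qo : List (String × List (String × List (String × Int)))) (j : Nat) (h : String) : List Int :=
  ((qo.take j).map (fun e => if e.2.any (fun p => p.1 == h) then (1 : Int) else 0))
    ++ List.replicate (qo.length - j) 0

lemma pvVec_of_not_any (qo : List (String × List (String × List (String × Int)))) (j : Nat) (h : String)
    (hj : j ≤ qo.length)
    (hn : (qo.take j).any (fun e => e.2.any (fun p => p.1 == h)) = false) :
    pvVec qo j h = List.replicate qo.length (0 : Int) := by
  unfold pvVec
  have hmap : (qo.take j).map (fun e => if e.2.any (fun p => p.1 == h) then (1 : Int) else 0)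
      = List.replicate j (0 : Int) := by
    rw [List.eq_replicate_iff]
    constructor
    · simp [Nat.min_eq_left hj]
    · intro b hb
      rcases List.mem_map.1 hb with ⟨e, he, rfl⟩
      rw [List.any_eq_false] at hn
      simp [hn e he]
  rw [hmap, ← List.replicate_add]
  congr 1
  omega

lemma pvVec_succ_true (qo : List (String × List (String × List (String × Int)))) (j : Nat) (h : String)
    (hj : j < qo.length)
    (he : (qo[j]'hj).2.any (fun p => p.1 == h) = true) :
    pvVec qo (j + 1) h = (pvVec qo j h).set j 1 := by
  unfold pvVec
  have hlen : ((qo.take j).map (fun e => if e.2.any (fun p => p.1 == h) then (1 : Int) else 0)).length = j := by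
    simp [Nat.min_eq_left (Nat.le_of_lt hj)]
  rw [List.take_add_one, List.getElem?_eq_getElem hj]
  have hrep : List.replicate (qo.length - j) (0 : Int) = 0 :: List.replicate (qo.length - (j+1)) 0 := by
    have : qo.length - j = (qo.length - (j+1)) + 1 := by omega
    rw [this, List.replicate_succ]
  rw [List.set_append, hlen]
  simp only [lt_irrefl, if_false, Nat.sub_self, hrep, List.set_cons_zero]
  rw [show (some qo[j]).toList = [qo[j]] from rfl, List.map_append, List.append_assoc]
  simp only [List.map_cons, List.map_nil, he, if_true, List.singleton_append]
lemma pvVec_succ_false (qo : List (String × List (String × List (String × Int)))) (j : Nat) (h : String)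
    (hj : j < qo.length)
    (he : (qo[j]'hj).2.any (fun p => p.1 == h) = false) :
    pvVec qo (j + 1) h = pvVec qo j h := by
  unfold pvVec
  rw [List.take_add_one, List.getElem?_eq_getElem hj]
  have hrep : List.replicate (qo.length - j) (0 : Int) = 0 :: List.replicate (qo.length - (j+1)) 0 := by
    have : qo.length - j = (qo.length - (j+1)) + 1 := by omega
    rw [this, List.replicate_succ]
  simp only [hrep]
  rw [show (some qo[j]).toList = [qo[j]] from rfl, List.map_append, List.append_assoc]
  simp only [List.map_cons, List.map_nil, he, Bool.false_eq_true, if_false, List.singleton_append]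

lemma pv_inner_get? (dflt : List Int) (j : Nat) :
    ∀ (hs : List (String × List (String × Int))) (d : PySem.Dict String (List Int)) (h : String),
    (hs.foldl (fun d hp => d.insert hp.1 ((d.getD hp.1 dflt).set j 1)) d).get? h
      = if hs.any (fun p => p.1 == h) then some ((d.getD h dflt).set j 1) else d.get? h := by
  intro hs
  induction hs with
  | nil => intro d h; simp
  | cons hp t ih =>
    intro d h
    simp only [List.foldl_cons, List.any_cons]
    rw [ih]
    by_cases hth : (t.any fun p => p.1 == h) = true <;> by_cases hk : h = hp.1 <;>
      simp [hth, hk, PySem.Dict.getD_insert, PySem.Dict.get?_insert, List.set_set] <;>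
      exact fun habs => absurd habs.symm hk

lemma pv_outer_get? (qo : List (String × List (String × List (String × Int)))) :
    ∀ (suf : List (String × List (String × List (String × Int)))) (j : Nat)
      (d : PySem.Dict String (List Int)),
    qo.drop j = suf →
    (∀ h, d.get? h = if (qo.take j).any (fun e => e.2.any (fun p => p.1 == h)) then some (pvVec qo j h) else none) →
    ∀ h,
    ((PySem.List.enumerate suf (j : Int)).foldl
        (fun d p => p.2.2.foldl
          (fun d hp => d.insert hp.1 ((d.getD hp.1 (List.replicate qo.length (0 : Int))).set p.1.toNat 1)) d)
        d).get? h
      = if qo.any (fun e => e.2.any (fun p => p.1 == h)) then some (pvVec qo qo.length h) else none := by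
  intro suf
  induction suf with
  | nil =>
    intro j d hdrop hinv h
    have hj : qo.length ≤ j := List.drop_eq_nil_iff.1 hdrop
    have htake : qo.take j = qo := List.take_of_length_le hj
    have hvec : pvVec qo j h = pvVec qo qo.length h := by
      unfold pvVec
      rw [htake, List.take_length, Nat.sub_self, show qo.length - j = 0 by omega]
    rw [PySem.List.enumerate_nil, List.foldl_nil, hinv h, htake, hvec]
  | cons e t ih =>
    intro j d hdrop hinv h
    have hj : j < qo.length := by
      by_contra hge
      rw [List.drop_eq_nil_iff.2 (by omega)] at hdrop
      cases hdrop
    have h2 := List.drop_eq_getElem_cons hj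
    rw [hdrop] at h2
    injection h2 with h3 h4
    rw [PySem.List.enumerate_cons, List.foldl_cons,
        show ((j : Int) + 1) = (((j + 1 : Nat)) : Int) by push_cast; ring]
    simp only [Int.toNat_natCast]
    apply ih (j + 1) _ h4.symm
    intro h'
    rw [pv_inner_get?]
    have htakeany : (qo.take (j+1)).any (fun e => e.2.any (fun p => p.1 == h'))
        = ((qo.take j).any (fun e => e.2.any (fun p => p.1 == h')) || e.2.any (fun p => p.1 == h')) := by
      rw [List.take_add_one, List.getElem?_eq_getElem hj, ← h3]
      simp
    by_cases he : (e.2.any fun p => p.1 == h') = true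
    · rw [if_pos he, htakeany, he]
      simp only [Bool.or_true, if_true]
      congr 1
      rw [PySem.Dict.getD, hinv h']
      by_cases hta : ((qo.take j).any fun e => e.2.any (fun p => p.1 == h')) = true
      · rw [if_pos hta, pvVec_succ_true qo j h' hj (h3 ▸ he)]
        rfl
      · have hta' : ((qo.take j).any fun e => e.2.any (fun p => p.1 == h')) = false := Bool.eq_false_iff.2 hta
        rw [if_neg hta, pvVec_succ_true qo j h' hj (h3 ▸ he),
            pvVec_of_not_any qo j h' (le_of_lt hj) hta']
        rfl
    · have he' : (e.2.any fun p => p.1 == h') = false := Bool.eq_false_iff.2 he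
      rw [if_neg he, htakeany, he', Bool.or_false, hinv h',
          pvVec_succ_false qo j h' hj (h3 ▸ he')]

lemma pv_outer_keys (dflt : List Int) :
    ∀ (suf : List (String × List (String × List (String × Int)))) (s : Int)
      (d : PySem.Dict String (List Int)),
    ((PySem.List.enumerate suf s).foldl
        (fun d p => p.2.2.foldl
          (fun d hp => d.insert hp.1 ((d.getD hp.1 dflt).set p.1.toNat 1)) d)
        d).keys
      = PySem.Set.update d.keys (suf.flatMap (fun e => e.2.map (fun p => p.1))) := by
  intro suf
  induction suf with
  | nil => intro s d; simp [PySem.List.enumerate_nil, PySem.Set.update]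
  | cons e t ih =>
    intro s d
    rw [PySem.List.enumerate_cons, List.foldl_cons, ih, List.flatMap_cons,
        PySem.Dict.keys_foldl_insert_key e.2 (fun hp => hp.1)
          (fun d hp => ((d.getD hp.1 dflt).set s.toNat 1)) d]
    simp [PySem.Set.update, List.foldl_append]


lemma pv_main (qo : List (String × List (String × List (String × Int)))) :
    annotate_holdings qo = annotate_holdings_alt qo := by
  have hA : annotate_holdings qo
      = ((PySem.List.enumerate qo ((0 : Nat) : Int)).foldl
          (fun d p => p.2.2.foldl
            (fun d hp => d.insert hp.1 ((d.getD hp.1 (List.replicate qo.length (0 : Int))).set p.1.toNat 1)) d)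
          PySem.Dict.empty).items.map (fun kv => (kv.1, PySem.Str.join "" (kv.2.map PySem.Int.toStr))) := by
    unfold annotate_holdings
    simp only [PySem.List.pyRepeat_singleton, Int.toNat_natCast, Nat.cast_zero]
  rw [hA]
  set dF := ((PySem.List.enumerate qo ((0 : Nat) : Int)).foldl
          (fun d p => p.2.2.foldl
            (fun d hp => d.insert hp.1 ((d.getD hp.1 (List.replicate qo.length (0 : Int))).set p.1.toNat 1)) d)
          PySem.Dict.empty) with hdF
  have hkeys : dF.keys = PySem.List.dedup (qo.flatMap (fun e => e.2.map (fun p => p.1))) := by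
    rw [hdF, pv_outer_keys (List.replicate qo.length (0 : Int)) qo ((0 : Nat) : Int) PySem.Dict.empty,
        PySem.Dict.keys_empty, PySem.List.dedup_eq_ofList]
    rfl
  have hnodup : dF.keys.Nodup := by
    rw [hkeys, PySem.List.dedup_eq_ofList]
    exact PySem.Set.nodup_ofList _
  have hget := pv_outer_get? qo qo 0 PySem.Dict.empty rfl
    (by intro h; simp [PySem.Dict.get?_empty])
  rw [PySem.Dict.items_eq_map_keys dF hnodup [], hkeys]
  simp only [annotate_holdings_alt]
  rw [List.flatMap_map, List.map_map]
  apply List.map_congr_left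
  intro k hk
  have hkin : k ∈ qo.flatMap (fun e => e.2.map (fun p => p.1)) := (PySem.List.mem_dedup _ _).1 hk
  have hany : (qo.any fun e => e.2.any fun p => p.1 == k) = true := by
    rcases List.mem_flatMap.1 hkin with ⟨e, he, hkm⟩
    rcases List.mem_map.1 hkm with ⟨p, hp, rfl⟩
    rw [List.any_eq_true]
    exact ⟨e, he, by rw [List.any_eq_true]; exact ⟨p, hp, by simp⟩⟩
  have hgd : dF.getD k [] = pvVec qo qo.length k := by
    rw [PySem.Dict.getD, hget k, if_pos hany]
    rfl
  simp only [Function.comp_apply]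
  rw [hgd]
  congr 1
  unfold pvVec
  rw [List.take_length, Nat.sub_self, List.replicate_zero, List.append_nil, List.map_map, List.map_map]
  congr 1
  apply List.map_congr_left
  intro e _
  by_cases hc : (e.2.any fun p => p.1 == k) = true <;>
    simp [hc, PySem.Dict.contains_mk, PySem.Int.toStr] <;> decide

-- ===== VERDICT (by name: the statement is the Claim_ definition above) =====
theorem annotate_holdings_spec : Claim_equal_annotate_holdings := by
  intro qo _
  unfold Spec_annotate_holdings
  exact pv_main qo
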